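-- pv_equiv track=rewrite | github.com/IHB-IBR-department/BenchmarkingEOEC | benchmarking/icc_data_preparation.py | normalize_kinds
-- ===== SOURCE A (Python) =====
-- def normalize_kinds(values: list[str] | None) -> list[str] | None:
--     """
--     Normalize FC-kind aliases to `compute_fc_from_strategy_file` keys.
--
--     Returns list of keys from: corr, partial, tangent, glasso.
--     """
--     if values is None:
--         return None
--     if not values:
--         return None
--     mapping = {
--         "corr": "corr",
--         "correlation": "corr",
--         "pc": "partial",
--         "partial": "partial",
--         "partial_corr": "partial",
--         "partial-corr": "partial",
--         "tang": "tangent",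
--         "tangent": "tangent",
--         "glasso": "glasso",
--     }
--     allowed = {"corr", "partial", "tangent", "glasso"}
--     normalized: list[str] = []
--     for raw in values:
--         key = mapping.get(str(raw).strip().lower())
--         if key is None or key not in allowed:
--             raise ValueError(
--                 f"Unknown FC kind: {raw}. Allowed: corr, pc/partial, tang/tangent, glasso."
--             )
--         if key not in normalized:
--             normalized.append(key)
--     return normalized
-- ===== SOURCE B (Python) =====
-- def normalize_kinds(values):
--     """
--     Normalize FC-kind aliases to `compute_fc_from_strategy_file` keys.
--
--     Returns list of keys from: corr, partial, tangent, glasso.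
--     """
--     if values is None:
--         return None
--     if not values:
--         return None
--     mapping = {
--         "corr": "corr",
--         "correlation": "corr",
--         "pc": "partial",
--         "partial": "partial",
--         "partial_corr": "partial",
--         "partial-corr": "partial",
--         "tang": "tangent",
--         "tangent": "tangent",
--         "glasso": "glasso",
--     }
--     keys = []
--     for raw in values:
--         key = mapping.get(str(raw).strip().lower())
--         if key is None:
--             raise ValueError(
--                 f"Unknown FC kind: {raw}. Allowed: corr, pc/partial, tang/tangent, glasso."
--             )
--         keys.append(key)
--     # order the fixed canonical keys by their first occurrence instead of deduping
--     firsts = [(keys.index(k), k) for k in ("corr", "partial", "tangent", "glasso")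
--               if k in keys]
--     firsts.sort(key=lambda t: t[0])
--     return [k for _, k in firsts]
-- ===== Notes on version B (the rewrite author's own statement) =====
-- stated objective: alternative
-- what changed: Replaces A's dedupe-while-scanning accumulator with a different algorithm: map/validate all values to keys, then for each of the four fixed canonical keys record its first-occurrence index and sort the present keys by that index, so no dedup membership scan of the growing output exists.
import Mathlib
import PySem

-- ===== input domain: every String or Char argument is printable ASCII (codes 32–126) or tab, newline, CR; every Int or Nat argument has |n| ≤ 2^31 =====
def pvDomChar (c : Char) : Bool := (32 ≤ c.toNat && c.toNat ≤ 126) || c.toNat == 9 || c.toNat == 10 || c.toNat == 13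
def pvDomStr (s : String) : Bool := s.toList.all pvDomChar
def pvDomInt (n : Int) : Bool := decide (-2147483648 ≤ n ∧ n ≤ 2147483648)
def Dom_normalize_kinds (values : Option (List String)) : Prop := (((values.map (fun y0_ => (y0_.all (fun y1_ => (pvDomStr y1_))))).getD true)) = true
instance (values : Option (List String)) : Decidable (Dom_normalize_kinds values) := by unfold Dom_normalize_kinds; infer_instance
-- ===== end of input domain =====

-- B replaces A's dedupe-while-scanning accumulator with: map/validate all values to keys, then
-- order the four fixed canonical keys by first-occurrence index (a sort); equivalence is proved
-- on inputs where A returns (Pre_ excludes the ValueError inputs, on which both programs raise).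

-- ===== PORT A =====
-- the `mapping` dict literal
def pvMapping : PySem.Dict String String := PySem.Dict.ofList
  [("corr", "corr"), ("correlation", "corr"), ("pc", "partial"), ("partial", "partial"),
   ("partial_corr", "partial"), ("partial-corr", "partial"), ("tang", "tangent"),
   ("tangent", "tangent"), ("glasso", "glasso")]

-- the `allowed` set literal
def pvAllowed : PySem.Set String := PySem.Set.ofList ["corr", "partial", "tangent", "glasso"]

-- A's loop: accumulate `normalized`; `none` marks the raised ValueError
def pvLoopA : List String → List String → Option (List String)
  | [], normalized => some normalized
  | raw :: rest, normalized =>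
    match pvMapping.get? (PySem.Str.lower (PySem.Str.strip raw)) with
    | none => none
    | some key =>
      if pvAllowed.contains key then
        pvLoopA rest (if normalized.contains key then normalized else normalized ++ [key])
      else none

def normalize_kinds (values : Option (List String)) : Option (List String) :=
  match values with
  | none => none
  | some vs => if vs = [] then none else pvLoopA vs []

-- ===== PORT B =====
-- the canonical-key tuple ("corr", "partial", "tangent", "glasso")
def pvCanon : List String := ["corr", "partial", "tangent", "glasso"]

-- B's validating map loop (`keys`); `none` marks the raised ValueError
def pvMapAll : List String → Option (List String)
  | [] => some []
  | raw :: rest =>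
    match pvMapping.get? (PySem.Str.lower (PySem.Str.strip raw)) with
    | none => none
    | some key => (pvMapAll rest).map (key :: ·)

def normalize_kinds_alt (values : Option (List String)) : Option (List String) :=
  match values with
  | none => none
  | some vs =>
    if vs = [] then none
    else (pvMapAll vs).map (fun keys =>
      -- firsts = [(keys.index(k), k) for k in canon if k in keys]; `.getD 0` is unreachable (k ∈ keys)
      let firsts := (pvCanon.filter (fun k => keys.contains k)).map
        (fun k => ((PySem.List.index? keys k).getD 0, k))
      -- firsts.sort(key=lambda t: t[0]); return [k for _, k in firsts]
      (PySem.List.sorted firsts (fun t => t.1) false).map Prod.snd)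

-- ===== PRECONDITION & SPEC =====
-- the alias keys of `mapping`, for stating Pre_ without mentioning either port
def pvAliases : List String :=
  ["corr", "correlation", "pc", "partial", "partial_corr", "partial-corr", "tang", "tangent", "glasso"]

-- Pre_ excludes exactly the inputs on which A raises ValueError: some element whose
-- stripped, lowercased form is not a known alias.
def Pre_normalize_kinds (values : Option (List String)) : Prop :=
  ∀ vs, values = some vs → ∀ r ∈ vs, PySem.Str.lower (PySem.Str.strip r) ∈ pvAliases
instance (values : Option (List String)) : Decidable (Pre_normalize_kinds values) := by
  unfold Pre_normalize_kinds; infer_instance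

def pvWitness_normalize_kinds : Option (List String) := some ["Corr", " pc ", "TANG", "corr"]

def Spec_normalize_kinds (values : Option (List String)) (out : Option (List String)) : Prop := out = normalize_kinds_alt values
instance (values : Option (List String)) (out : Option (List String)) : Decidable (Spec_normalize_kinds values out) := by unfold Spec_normalize_kinds; infer_instance

-- ===== CLAIM (what is proved, stated in full; the proofs are below) =====
def Claim_equal_normalize_kinds : Prop := ∀ (values : Option (List String)), Dom_normalize_kinds values → Pre_normalize_kinds values → Spec_normalize_kinds values (normalize_kinds values)

-- ===== LEMMAS AND PROOFS =====

-- every value of the mapping dict is a canonical key (hence in `allowed`)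
theorem pvMapping_mem_canon (x k : String)
    (h : pvMapping.get? x = some k) : k ∈ pvCanon := by
  have hmk : pvMapping = PySem.Dict.mk
      [("corr", "corr"), ("correlation", "corr"), ("pc", "partial"), ("partial", "partial"),
       ("partial_corr", "partial"), ("partial-corr", "partial"), ("tang", "tangent"),
       ("tangent", "tangent"), ("glasso", "glasso")] := by decide
  rw [hmk] at h
  simp only [PySem.Dict.get?_mk_cons] at h
  split_ifs at h
  all_goals first
    | (simp only [Option.some.injEq] at h; subst h; decide)
    | simp [PySem.Dict.get?] at h

theorem pvCanon_allowed (k : String) (h : k ∈ pvCanon) : pvAllowed.contains k = true := by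
  fin_cases h <;> decide

-- an alias is exactly a key the mapping dict resolves
theorem pvMapping_isSome_of_alias (x : String) (h : x ∈ pvAliases) :
    (pvMapping.get? x).isSome = true := by
  simp only [pvAliases, List.mem_cons, List.not_mem_nil, or_false] at h
  rcases h with h | h | h | h | h | h | h | h | h <;> subst h <;> decide

-- A's fused loop equals B's map pass followed by set-accumulation of the keys
theorem pvLoopA_eq_mapAll (rs : List String) :
    ∀ acc, (∀ r ∈ rs, PySem.Str.lower (PySem.Str.strip r) ∈ pvAliases) →
      pvLoopA rs acc = (pvMapAll rs).map (fun ks => ks.foldl PySem.Set.add acc) := by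
  induction rs with
  | nil => intro acc _; simp [pvLoopA, pvMapAll]
  | cons r rest ih =>
    intro acc hpre
    have hr := pvMapping_isSome_of_alias _ (hpre r (by simp))
    obtain ⟨k, hk⟩ := Option.isSome_iff_exists.mp hr
    simp only [pvLoopA, pvMapAll, hk, pvCanon_allowed _ (pvMapping_mem_canon _ _ hk), if_true]
    rw [ih _ (fun r hr => hpre r (by simp [hr]))]
    cases pvMapAll rest <;>
      simp [List.foldl, PySem.Set.add, List.contains_eq_mem]

-- every key B's map pass produces is canonical
theorem pvMapAll_canon (rs ks : List String) (h : pvMapAll rs = some ks) :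
    ∀ k ∈ ks, k ∈ pvCanon := by
  induction rs generalizing ks with
  | nil => simp only [pvMapAll, Option.some.injEq] at h; subst h; simp
  | cons r rest ih =>
    simp only [pvMapAll] at h
    cases hg : pvMapping.get? (PySem.Str.lower (PySem.Str.strip r)) with
    | none => rw [hg] at h; simp at h
    | some k =>
      rw [hg] at h
      cases hm : pvMapAll rest with
      | none => rw [hm] at h; simp at h
      | some ks' =>
        rw [hm] at h
        simp only [Option.map_some, Option.some.injEq] at h
        subst h
        intro y hy
        rcases List.mem_cons.mp hy with hy | hy
        · exact hy ▸ pvMapping_mem_canon _ _ hg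
        · exact ih ks' hm y hy

-- set(ks) is pairwise increasing in first-occurrence index
theorem pvOfList_pairwise_index (ks : List String) :
    (PySem.Set.ofList ks).Pairwise
      (fun a b => (PySem.List.index? ks a).getD 0 < (PySem.List.index? ks b).getD 0) := by
  induction ks with
  | nil => simp [PySem.Set.ofList_nil]
  | cons x xs ih =>
    rw [PySem.Set.ofList_cons]
    constructor
    · intro y hy
      obtain ⟨hy_mem, hy_ne⟩ := (PySem.Set.mem_discard _ _ _).mp hy
      have hyxs : y ∈ xs := (PySem.Set.mem_ofList _ _).mp hy_mem
      obtain ⟨j, hj⟩ := Option.isSome_iff_exists.mp ((PySem.List.index?_isSome_iff _ _).mpr hyxs)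
      rw [PySem.List.index?_cons_self, PySem.List.index?_cons_of_ne _ (Ne.symm hy_ne), hj]
      simp
    · have hsub : (PySem.Set.discard (PySem.Set.ofList xs) x).Sublist (PySem.Set.ofList xs) := by
        simp only [PySem.Set.discard]
        exact List.filter_sublist ..
      refine ((ih.sublist hsub).imp_of_mem ?_)
      intro a b ha hb hab
      obtain ⟨haxs, hane⟩ := (PySem.Set.mem_discard _ _ _).mp ha
      obtain ⟨hbxs, hbne⟩ := (PySem.Set.mem_discard _ _ _).mp hb
      obtain ⟨i, hi⟩ := Option.isSome_iff_exists.mp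
        ((PySem.List.index?_isSome_iff _ _).mpr ((PySem.Set.mem_ofList _ _).mp haxs))
      obtain ⟨j, hj⟩ := Option.isSome_iff_exists.mp
        ((PySem.List.index?_isSome_iff _ _).mpr ((PySem.Set.mem_ofList _ _).mp hbxs))
      rw [PySem.List.index?_cons_of_ne _ (Ne.symm hane),
          PySem.List.index?_cons_of_ne _ (Ne.symm hbne), hi, hj]
      rw [hi, hj] at hab
      simpa using hab

-- the heart: for canonical-only keys, dedupe = canonical keys sorted by first occurrence
theorem pvDedup_eq_sortFirsts (ks : List String) (hks : ∀ k ∈ ks, k ∈ pvCanon) :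
    PySem.Set.ofList ks =
      (PySem.List.sorted
        ((pvCanon.filter (fun k => ks.contains k)).map
          (fun k => ((PySem.List.index? ks k).getD 0, k)))
        (fun t => t.1) false).map Prod.snd := by
  set f : String → Nat × String := fun k => ((PySem.List.index? ks k).getD 0, k) with hf
  have hperm : (PySem.Set.ofList ks).Perm (pvCanon.filter (fun k => ks.contains k)) := by
    refine (List.perm_ext_iff_of_nodup (PySem.Set.nodup_ofList ks) ?_).mpr ?_
    · exact List.Nodup.filter _ (by decide)
    · intro y
      simp only [PySem.Set.mem_ofList, List.mem_filter, List.contains_eq_mem, decide_eq_true_eq]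
      constructor
      · intro hy; exact ⟨hks y hy, hy⟩
      · intro hy; exact hy.2
  have hsorted : PySem.List.sorted ((pvCanon.filter (fun k => ks.contains k)).map f)
      (fun t => t.1) false = (PySem.Set.ofList ks).map f := by
    refine PySem.List.sorted_eq_of_perm_of_pairwise_lt _ _ _ (hperm.map f) ?_
    refine List.pairwise_map.mpr ?_
    exact pvOfList_pairwise_index ks
  rw [hsorted, List.map_map]
  rw [show (Prod.snd ∘ f) = id from rfl, List.map_id]

-- ===== VERDICT (by name: the statement is the Claim_ definition above) =====
theorem normalize_kinds_spec : Claim_equal_normalize_kinds := by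
  intro values _ hpre
  unfold Spec_normalize_kinds normalize_kinds normalize_kinds_alt
  cases values with
  | none => rfl
  | some vs =>
    by_cases hvs : vs = []
    · simp [hvs]
    · simp only [hvs, if_false]
      rw [pvLoopA_eq_mapAll vs [] (hpre vs rfl)]
      cases hm : pvMapAll vs with
      | none => rfl
      | some ks =>
        simp only [Option.map_some, Option.some.injEq]
        rw [← PySem.Set.ofList_eq_foldl]
        exact pvDedup_eq_sortFirsts ks (pvMapAll_canon vs ks hm)
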